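-- pv_equiv track=rewrite | github.com/PedroRezende14/Projeto-IA | 8puzzle/ilha.py | gerar_estados_navegacao
-- ===== SOURCE A (Python) =====
-- def gerar_estados_navegacao(inicial, caminho):
--     """Gera todos os estados intermediários para navegação"""
--     estados = [inicial[:]]
--     pecas_atual = inicial[:]
--
--     for indice_movimento in caminho:
--         indice_zero = pecas_atual.index(0)
--         pecas_atual[indice_zero], pecas_atual[indice_movimento] = pecas_atual[indice_movimento], pecas_atual[indice_zero]
--         estados.append(pecas_atual[:])
--
--     return estados
-- ===== SOURCE B (Python) =====
-- def gerar_estados_navegacao(inicial, caminho):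
--     """Gera todos os estados intermediários para navegação"""
--     # O vazio termina onde cada movimento começa: a lista de trocas é conhecida
--     # de antemão, sem procurar o 0 a cada passo.
--     trocas = zip([inicial.index(0)] + list(caminho), caminho)
--     estados = [list(inicial)]
--     for vazio, destino in trocas:
--         novo = list(estados[-1])
--         novo[vazio], novo[destino] = novo[destino], novo[vazio]
--         estados.append(novo)
--     return estados
-- ===== Notes on version B (the rewrite author's own statement) =====
-- stated objective: alternative
-- what changed: B precomputes the blank's whole trajectory (the blank ends up exactly where each move starts), zips it with the moves into an explicit list of swap pairs, and folds those swaps over the growing state list, reading estados[-1] -- the per-move linear index(0) scan of A disappears; Pre_ excludes boards without a 0 (B's single upfront index(0) raises ValueError where A returns only the trivial no-move answer) and boards with more than one 0 under a nonempty path (which zero is 'the blank' is ambiguous; A's rescan-first-match answer is accidental).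
-- outside the precondition, e.g. on gerar_estados_navegacao([1, 2], []): A returns [[1, 2]], B raises ValueError
import Mathlib
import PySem

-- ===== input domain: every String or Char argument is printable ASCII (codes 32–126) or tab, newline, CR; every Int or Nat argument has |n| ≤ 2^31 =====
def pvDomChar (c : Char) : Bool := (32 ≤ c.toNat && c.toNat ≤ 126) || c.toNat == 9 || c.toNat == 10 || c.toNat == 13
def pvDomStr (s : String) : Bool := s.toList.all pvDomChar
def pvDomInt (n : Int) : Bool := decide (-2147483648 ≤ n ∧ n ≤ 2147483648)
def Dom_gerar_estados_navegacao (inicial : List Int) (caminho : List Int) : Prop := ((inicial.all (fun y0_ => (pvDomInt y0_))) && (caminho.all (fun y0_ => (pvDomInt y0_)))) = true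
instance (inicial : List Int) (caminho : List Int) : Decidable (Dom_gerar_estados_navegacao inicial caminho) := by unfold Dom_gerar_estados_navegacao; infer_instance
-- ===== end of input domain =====

-- B precomputes the blank's trajectory (the blank ends where each move starts) and folds
-- the resulting swap pairs, with no per-move index(0) scan; objective: alternative, same cost.

-- ===== PORT A =====
-- literal transliteration of A's loop: state = (estados, pecas_atual); the tuple swap is
-- RHS-first, then assign pecas[indice_zero], then pecas[indice_movimento] (Python order).
def gerar_estados_navegacao (inicial : List Int) (caminho : List Int) : List (List Int) :=
  (caminho.foldl (fun (st : List (List Int) × List Int) indice_movimento =>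
      let pecas := st.2
      let indice_zero : Nat := (PySem.List.index? pecas 0).getD 0
      let vm := PySem.List.pyGetD pecas indice_movimento 0
      let vz := PySem.List.pyGetD pecas (indice_zero : Int) 0
      let pecas1 := PySem.List.pySetD pecas (indice_zero : Int) vm
      let pecas2 := PySem.List.pySetD pecas1 indice_movimento vz
      (st.1 ++ [pecas2], pecas2))
    ([inicial], inicial)).1

-- ===== PORT B =====
-- Source B: trocas = zip([inicial.index(0)] + list(caminho), caminho); each step copies
-- estados[-1], performs the precomputed swap, and appends.
def gerar_estados_navegacao_alt (inicial : List Int) (caminho : List Int) : List (List Int) :=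
  let trocas := List.zip ((((PySem.List.index? inicial 0).getD 0 : Nat) : Int) :: caminho) caminho
  trocas.foldl (fun (estados : List (List Int)) vd =>
      let novo := PySem.List.pyGetD estados (-1) []
      let t1 := PySem.List.pyGetD novo vd.2 0
      let t2 := PySem.List.pyGetD novo vd.1 0
      let novo1 := PySem.List.pySetD novo vd.1 t1
      let novo2 := PySem.List.pySetD novo1 vd.2 t2
      estados ++ [novo2])
    [inicial]

-- ===== PRECONDITION & SPEC =====
-- Pre_ excludes (a) inputs where A raises (nonempty caminho with no 0 on the board: ValueError;
-- an out-of-range move: IndexError); (b) boards without a 0 when caminho = [] — A returns the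
-- trivial [inicial] there but B's single upfront index(0) raises ValueError; and (c) boards with
-- more than one 0 under a nonempty caminho — which zero is 'the blank' is ambiguous and A's
-- rescan-first-match answer there is accidental, so B's tracked-blank answer may differ.
def Pre_gerar_estados_navegacao (inicial : List Int) (caminho : List Int) : Prop :=
  0 ∈ inicial ∧ (∀ i ∈ caminho, PySem.Raise.InRange inicial.length i) ∧
    (caminho ≠ [] → inicial.count 0 = 1)
instance (inicial : List Int) (caminho : List Int) : Decidable (Pre_gerar_estados_navegacao inicial caminho) := by unfold Pre_gerar_estados_navegacao; infer_instance

def pvWitness_gerar_estados_navegacao : List Int × List Int := ([1, 0, 2], [0, 2, 1])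

def Spec_gerar_estados_navegacao (inicial : List Int) (caminho : List Int) (out : List (List Int)) : Prop := out = gerar_estados_navegacao_alt inicial caminho
instance (inicial : List Int) (caminho : List Int) (out : List (List Int)) : Decidable (Spec_gerar_estados_navegacao inicial caminho out) := by unfold Spec_gerar_estados_navegacao; infer_instance

-- ===== CLAIM (what is proved, stated in full; the proofs are below) =====
def Claim_equal_gerar_estados_navegacao : Prop := ∀ (inicial : List Int) (caminho : List Int), Dom_gerar_estados_navegacao inicial caminho → Pre_gerar_estados_navegacao inicial caminho → Spec_gerar_estados_navegacao inicial caminho (gerar_estados_navegacao inicial caminho)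

-- ===== LEMMAS AND PROOFS =====

-- normalized (Python) index as a Nat, for InRange indices
def pvNat (n : Nat) (i : Int) : Nat := if 0 ≤ i then i.toNat else n - (-i).toNat

-- the common swap step: the board with positions z and j exchanged (z the blank, j the move)
def pvSwap (xs : List Int) (z j : Nat) : List Int :=
  (xs.set z (xs.getD j 0)).set j (xs.getD z 0)

-- the sequence of boards both programs generate after each move, blank position threaded
def pvChain (cur : List Int) (z : Nat) : List Int → List (List Int)
  | [] => []
  | d :: c =>
      let j := pvNat cur.length d
      let nxt := pvSwap cur z j
      nxt :: pvChain nxt j c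

-- 'z is the unique position of 0 on xs'
def pvUniq (xs : List Int) (z : Nat) : Prop :=
  z < xs.length ∧ xs.getD z 0 = 0 ∧ ∀ k, k < xs.length → xs.getD k 0 = 0 → k = z

lemma pvNat_lt {n : Nat} {i : Int} (h : PySem.Raise.InRange n i) : pvNat n i < n := by
  rcases h with ⟨h1, h2⟩; unfold pvNat; split_ifs <;> omega

lemma pvNat_natCast (n k : Nat) (_hk : k < n) : pvNat n (k : Int) = k := by
  simp [pvNat]

lemma pyIdx_norm {n : Nat} {i : Int} (h : PySem.Raise.InRange n i) :
    PySem.List.pyIdx? n i = some (pvNat n i) := by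
  rcases h with ⟨h1, h2⟩
  simp only [PySem.List.pyIdx?, pvNat]
  split_ifs <;> simp_all

lemma pySetD_norm {xs : List Int} {i : Int} (v : Int)
    (h : PySem.Raise.InRange xs.length i) :
    PySem.List.pySetD xs i v = xs.set (pvNat xs.length i) v := by
  simp [PySem.List.pySetD, PySem.List.pySet?, pyIdx_norm h]

lemma pyGetD_norm {xs : List Int} {i : Int} (d : Int)
    (h : PySem.Raise.InRange xs.length i) :
    PySem.List.pyGetD xs i d = xs.getD (pvNat xs.length i) d := by
  simp [PySem.List.pyGetD, PySem.List.pyGet?, pyIdx_norm h,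
    List.getElem?_eq_getElem (pvNat_lt h)]

lemma length_pvSwap (xs : List Int) (z j : Nat) : (pvSwap xs z j).length = xs.length := by
  simp [pvSwap]

lemma pvSwap_getD (xs : List Int) {z j : Nat} (k : Nat)
    (hz : z < xs.length) (hj : j < xs.length) :
    (pvSwap xs z j).getD k 0 =
      if k = j then xs.getD z 0 else if k = z then xs.getD j 0 else xs.getD k 0 := by
  by_cases hk : k < xs.length
  · rw [List.getD_eq_getElem _ _ (by rw [length_pvSwap]; exact hk),
      List.getD_eq_getElem _ _ hz, List.getD_eq_getElem _ _ hj]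
    simp only [pvSwap, List.getElem_set]
    split_ifs <;> first
      | omega
      | (exact List.getD_eq_getElem _ _ (by omega))
      | (exact (List.getD_eq_getElem _ _ (by omega)).symm)
  · rw [List.getD_eq_default _ _ (by rw [length_pvSwap]; omega),
      if_neg (by omega), if_neg (by omega), List.getD_eq_default _ _ (by omega)]

lemma pvUniq_swap {xs : List Int} {z j : Nat} (h : pvUniq xs z) (hj : j < xs.length) :
    pvUniq (pvSwap xs z j) j := by
  obtain ⟨hz, h0, hu⟩ := h
  refine ⟨by rw [length_pvSwap]; exact hj, ?_, ?_⟩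
  · rw [pvSwap_getD xs j hz hj, if_pos rfl]; exact h0
  · intro k hk hk0
    rw [length_pvSwap] at hk
    rw [pvSwap_getD xs k hz hj] at hk0
    by_cases h1 : k = j
    · exact h1
    · rw [if_neg h1] at hk0
      by_cases h2 : k = z
      · rw [if_pos h2] at hk0
        exact absurd (hu j hj hk0) (by omega)
      · rw [if_neg h2] at hk0
        exact absurd (hu k hk hk0) h2

lemma index?_of_uniq {xs : List Int} {z : Nat} (h : pvUniq xs z) :
    PySem.List.index? xs 0 = some z := by
  obtain ⟨hz, h0, hu⟩ := h
  have hmem : (0 : Int) ∈ xs := by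
    rw [List.getD_eq_getElem _ _ hz] at h0
    exact h0 ▸ List.getElem_mem hz
  obtain ⟨jn, hj⟩ := Option.isSome_iff_exists.1 ((PySem.List.index?_isSome_iff (xs := xs) (v := 0)).2 hmem)
  obtain ⟨hjlt, hjv, -⟩ := PySem.List.getElem_of_index?_eq_some hj
  have : jn = z := hu jn hjlt (by rw [List.getD_eq_getElem _ _ hjlt]; exact hjv)
  rwa [this] at hj

-- a board counting 0 exactly once has a unique zero position
lemma uniq_of_count_one {xs : List Int} {z : Nat} (hz : z < xs.length)
    (h0 : xs.getD z 0 = 0) (hc : xs.count 0 = 1) : pvUniq xs z := by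
  refine ⟨hz, h0, ?_⟩
  intro k hk hk0
  by_contra hne
  rw [List.getD_eq_getElem _ _ hz] at h0
  rw [List.getD_eq_getElem _ _ hk] at hk0
  have h2 : 2 ≤ xs.count 0 := by
    rcases Nat.lt_or_ge k z with hlt | hge
    · have : xs.take z ≠ [] := by
        have := List.length_take_of_le (le_of_lt hz)
        intro hemp; rw [hemp] at this; simp at this; omega
      calc 2 = 1 + 1 := by omega
        _ ≤ (xs.take z).count 0 + (xs.drop z).count 0 := by
            have hk' : (0 : Int) ∈ xs.take z := by
              apply List.mem_iff_getElem.2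
              refine ⟨k, by simp [List.length_take]; omega, ?_⟩
              rw [List.getElem_take]; exact hk0
            have hz' : (0 : Int) ∈ xs.drop z := by
              apply List.mem_iff_getElem.2
              refine ⟨0, by simp; omega, ?_⟩
              rw [List.getElem_drop]; simpa using h0
            have := List.count_pos_iff.2 hk'
            have := List.count_pos_iff.2 hz'
            omega
        _ = xs.count 0 := by rw [← List.count_append, List.take_append_drop]
    · have hlt : z < k := by omega
      calc 2 = 1 + 1 := by omega
        _ ≤ (xs.take k).count 0 + (xs.drop k).count 0 := by
            have hz' : (0 : Int) ∈ xs.take k := by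
              apply List.mem_iff_getElem.2
              refine ⟨z, by simp [List.length_take]; omega, ?_⟩
              rw [List.getElem_take]; exact h0
            have hk' : (0 : Int) ∈ xs.drop k := by
              apply List.mem_iff_getElem.2
              refine ⟨0, by simp; omega, ?_⟩
              rw [List.getElem_drop]; simpa using hk0
            have := List.count_pos_iff.2 hz'
            have := List.count_pos_iff.2 hk'
            omega
        _ = xs.count 0 := by rw [← List.count_append, List.take_append_drop]
  omega

-- one step of A (find the blank, swap in place) is pvSwap
lemma stepA_eq {cur : List Int} {z : Nat} {d : Int}
    (h : pvUniq cur z) (hd : PySem.Raise.InRange cur.length d) :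
    PySem.List.pySetD
      (PySem.List.pySetD cur (((PySem.List.index? cur 0).getD 0 : Nat) : Int)
        (PySem.List.pyGetD cur d 0))
      d (PySem.List.pyGetD cur (((PySem.List.index? cur 0).getD 0 : Nat) : Int) 0)
      = pvSwap cur z (pvNat cur.length d) := by
  have hiz : PySem.List.index? cur 0 = some z := index?_of_uniq h
  obtain ⟨hz, -, -⟩ := h
  rw [hiz]
  simp only [Option.getD_some]
  rw [pyGetD_norm _ hd, PySem.List.pyGetD_natCast, PySem.List.pySetD_natCast]
  have hd' : PySem.Raise.InRange (cur.set z (cur.getD (pvNat cur.length d) 0)).length d := by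
    simpa using hd
  rw [pySetD_norm _ hd']
  have : pvNat (cur.set z (cur.getD (pvNat cur.length d) 0)).length d = pvNat cur.length d := by
    simp
  rw [this]
  rfl

-- one step of B (copy estados[-1], apply the precomputed swap pair) is the same pvSwap
lemma stepB_eq {cur : List Int} {v d : Int}
    (hv : PySem.Raise.InRange cur.length v) (hd : PySem.Raise.InRange cur.length d) :
    PySem.List.pySetD (PySem.List.pySetD cur v (PySem.List.pyGetD cur d 0)) d
        (PySem.List.pyGetD cur v 0)
      = pvSwap cur (pvNat cur.length v) (pvNat cur.length d) := by
  rw [pyGetD_norm _ hd, pyGetD_norm _ hv, pySetD_norm _ hv]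
  have hd' : PySem.Raise.InRange
      (cur.set (pvNat cur.length v) (cur.getD (pvNat cur.length d) 0)).length d := by
    simpa using hd
  rw [pySetD_norm _ hd']
  have : pvNat (cur.set (pvNat cur.length v) (cur.getD (pvNat cur.length d) 0)).length d
      = pvNat cur.length d := by
    simp
  rw [this]
  rfl

-- A's threaded loop produces the chain
lemma loopA_eq (n : Nat) :
    ∀ (c : List Int) (acc : List (List Int)) (cur : List Int) (z : Nat),
      pvUniq cur z → cur.length = n → (∀ i ∈ c, PySem.Raise.InRange n i) →
      (c.foldl (fun (st : List (List Int) × List Int) indice_movimento =>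
          let pecas := st.2
          let indice_zero : Nat := (PySem.List.index? pecas 0).getD 0
          let vm := PySem.List.pyGetD pecas indice_movimento 0
          let vz := PySem.List.pyGetD pecas (indice_zero : Int) 0
          let pecas1 := PySem.List.pySetD pecas (indice_zero : Int) vm
          let pecas2 := PySem.List.pySetD pecas1 indice_movimento vz
          (st.1 ++ [pecas2], pecas2))
        (acc ++ [cur], cur)).1 = acc ++ cur :: pvChain cur z c := by
  intro c
  induction c with
  | nil => intro acc cur z _ _ _; simp [pvChain]
  | cons d c ih =>
    intro acc cur z h0 hl hc
    have hd : PySem.Raise.InRange cur.length d := by rw [hl]; exact hc d (by simp)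
    have hstep := stepA_eq h0 hd
    simp only [List.foldl_cons]
    rw [hstep]
    have hnxt : pvUniq (pvSwap cur z (pvNat cur.length d)) (pvNat cur.length d) :=
      pvUniq_swap h0 (pvNat_lt hd)
    have hih := ih (acc ++ [cur]) (pvSwap cur z (pvNat cur.length d)) (pvNat cur.length d)
      hnxt (by rw [length_pvSwap]; exact hl)
      (fun i hi => hc i (List.mem_cons_of_mem _ hi))
    rw [hih]
    simp [pvChain, List.append_assoc]

-- B's fold over the swap pairs produces the same chain
lemma loopB_eq (n : Nat) :
    ∀ (c : List Int) (acc : List (List Int)) (cur : List Int) (v : Int),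
      pvUniq cur (pvNat cur.length v) → PySem.Raise.InRange cur.length v →
      cur.length = n → (∀ i ∈ c, PySem.Raise.InRange n i) →
      ((List.zip (v :: c) c).foldl (fun (estados : List (List Int)) vd =>
          let novo := PySem.List.pyGetD estados (-1) []
          let t1 := PySem.List.pyGetD novo vd.2 0
          let t2 := PySem.List.pyGetD novo vd.1 0
          let novo1 := PySem.List.pySetD novo vd.1 t1
          let novo2 := PySem.List.pySetD novo1 vd.2 t2
          estados ++ [novo2])
        (acc ++ [cur])) = acc ++ cur :: pvChain cur (pvNat cur.length v) c := by
  intro c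
  induction c with
  | nil => intro acc cur v _ _ _ _; simp [pvChain]
  | cons d c ih =>
    intro acc cur v h0 hv hl hc
    have hd : PySem.Raise.InRange cur.length d := by rw [hl]; exact hc d (by simp)
    simp only [List.zip_cons_cons, List.foldl_cons]
    rw [PySem.List.pyGetD_neg_one_append_singleton]
    have hstep := stepB_eq hv hd
    simp only at hstep ⊢
    rw [hstep]
    have hnxt : pvUniq (pvSwap cur (pvNat cur.length v) (pvNat cur.length d)) (pvNat cur.length d) :=
      pvUniq_swap h0 (pvNat_lt hd)
    have hd2 : PySem.Raise.InRange (pvSwap cur (pvNat cur.length v) (pvNat cur.length d)).length d := by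
      rw [length_pvSwap]; exact hd
    have hnxt' : pvUniq (pvSwap cur (pvNat cur.length v) (pvNat cur.length d))
        (pvNat (pvSwap cur (pvNat cur.length v) (pvNat cur.length d)).length d) := by
      rw [length_pvSwap]; exact hnxt
    have hih := ih (acc ++ [cur]) (pvSwap cur (pvNat cur.length v) (pvNat cur.length d)) d
      hnxt' hd2 (by rw [length_pvSwap]; exact hl)
      (fun i hi => hc i (List.mem_cons_of_mem _ hi))
    simp only [length_pvSwap] at hih
    rw [hih]
    simp [pvChain, List.append_assoc]

-- ===== VERDICT (by name: the statement is the Claim_ definition above) =====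
theorem gerar_estados_navegacao_spec : Claim_equal_gerar_estados_navegacao := by
  intro inicial caminho _ hpre
  obtain ⟨hmem, hr, hcnt⟩ := hpre
  unfold Spec_gerar_estados_navegacao gerar_estados_navegacao gerar_estados_navegacao_alt
  cases caminho with
  | nil => simp
  | cons d c =>
    obtain ⟨jn, hj⟩ := Option.isSome_iff_exists.1 ((PySem.List.index?_isSome_iff (xs := inicial) (v := 0)).2 hmem)
    obtain ⟨hjlt, hjv, -⟩ := PySem.List.getElem_of_index?_eq_some hj
    have huniq : pvUniq inicial jn :=
      uniq_of_count_one hjlt (by rw [List.getD_eq_getElem _ _ hjlt]; exact hjv)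
        (hcnt (by simp))
    have hA := loopA_eq inicial.length (d :: c) [] inicial jn huniq rfl hr
    have hvj : PySem.Raise.InRange inicial.length ((jn : Nat) : Int) :=
      ⟨by omega, by exact_mod_cast hjlt⟩
    have huniq' : pvUniq inicial (pvNat inicial.length ((jn : Nat) : Int)) := by
      rw [pvNat_natCast _ _ hjlt]; exact huniq
    have hB := loopB_eq inicial.length (d :: c) [] inicial ((jn : Nat) : Int) huniq' hvj rfl hr
    simp only [List.nil_append] at hA hB
    simp only [hj, Option.getD_some]
    rw [hA, hB, pvNat_natCast _ _ hjlt]
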